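-- pv_equiv track=rewrite | github.com/therealmaxkim/Playground | Hackerrank/Alphabet Rangoli.py | print_horizontal
-- ===== SOURCE A (Python) =====
-- def print_horizontal(size, length):
--     line = []
--     left = []
--
--     #add the left side
--     #add the left '-' lines
--     for i in range(1, size-length):
--         left.append('--')
--
--     #account for 'a' being 1. Subtract 1. But not before the lines above
--     size = size - 1
--
--     #add the left letters
--     for i in range(0, length):
--         left.append(chr(ord('a')+size))
--         left.append('-')
--         size = size-1
--     line.extend(left)
--
--     #add the middle letter
--     line.append(chr(ord('a')+size))
--
--     #add the right side (just reversed of left side)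
--     line.extend(list(reversed(left)))
--
--     return ''.join(line)
-- ===== SOURCE B (Python) =====
-- def print_horizontal(size, length):
--     # Symmetric single-pass decomposition: edge dashes computed directly,
--     # body built as one '-'-joined list of letters descending then ascending.
--     m = max(length, 0)
--     edge = '-' * (2 * max(0, size - length - 1))
--     body = '-'.join(chr(ord('a') + size - 1 - m + abs(m - j)) for j in range(2 * m + 1))
--     return edge + body + edge
-- ===== Notes on version B (the rewrite author's own statement) =====
-- stated objective: simpler
-- what changed: Replaces A's three stateful append loops (edge-dash loop, letter loop mutating size, reversed-left mirroring) by a direct symmetric decomposition: the edge dashes are computed in closed form as '-'*(2*max(0,size-length-1)) and the body is built in one pass as a '-'-joined list of 2*max(length,0)+1 letters chr(ord('a')+size-1-m+abs(m-j)).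
import Mathlib
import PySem

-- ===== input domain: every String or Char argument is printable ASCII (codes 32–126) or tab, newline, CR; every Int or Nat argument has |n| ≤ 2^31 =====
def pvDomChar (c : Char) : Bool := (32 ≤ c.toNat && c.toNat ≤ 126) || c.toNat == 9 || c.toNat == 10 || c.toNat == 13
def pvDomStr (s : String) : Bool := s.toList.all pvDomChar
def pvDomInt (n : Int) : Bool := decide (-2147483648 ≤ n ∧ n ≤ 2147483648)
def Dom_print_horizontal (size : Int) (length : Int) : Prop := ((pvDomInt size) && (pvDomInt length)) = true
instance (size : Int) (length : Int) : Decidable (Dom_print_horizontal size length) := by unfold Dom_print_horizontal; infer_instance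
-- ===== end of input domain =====

-- B replaces A's three stateful append loops by a direct symmetric decomposition: the edge
-- dashes are computed in closed form and the body is one '-'-joined symmetric letter list
-- (objective: alternative/simpler; same asymptotic cost).


-- ===== PORT A =====
-- chr(n); exact on the code points Pre_ admits (valid, non-surrogate)
def pyChr (n : Int) : Char := Char.ofNat n.toNat

-- Python strings are carried as List Char (the PySem side); ''.join = PySem.Chars.join []
def print_horizontal (size : Int) (length : Int) : String :=
  let left0 : List (List Char) :=
    (PySem.List.pyRange 1 (size - length) 1).foldl (fun acc _ => acc ++ [['-', '-']]) []
  let size1 := size - 1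
  let st :=
    (PySem.List.pyRange 0 length 1).foldl
      (fun (p : List (List Char) × Int) _ => (p.1 ++ [[pyChr (97 + p.2)], ['-']], p.2 - 1))
      (left0, size1)
  let line := st.1 ++ [[pyChr (97 + st.2)]] ++ st.1.reverse
  String.ofList (PySem.Chars.join [] line)

-- ===== PORT B =====
def print_horizontal_alt (size : Int) (length : Int) : String :=
  let m := max length 0
  let edge : List Char := List.replicate (2 * max 0 (size - length - 1)).toNat '-'
  let body :=
    PySem.Chars.join ['-']
      ((PySem.List.pyRange 0 (2 * m + 1) 1).map
        (fun j => [pyChr (96 + size - m + ((m - j).natAbs : Int))]))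
  String.ofList (edge ++ body ++ edge)

-- ===== PRECONDITION & SPEC =====
-- Pre_ excludes the inputs where Python's chr raises ValueError (a letter code outside
-- 0..1114111), and the inputs whose letter codes reach the lone-surrogate range
-- 0xD800-0xDFFF: there both Pythons return the same str containing a lone surrogate,
-- which no Lean String can represent, so the equivalence cannot be stated in Lean.
def Pre_print_horizontal (size : Int) (length : Int) : Prop :=
  0 ≤ 96 + size - max length 0 ∧ 96 + size ≤ 1114111 ∧
    (96 + size < 55296 ∨ 57343 < 96 + size - max length 0)
instance (size : Int) (length : Int) : Decidable (Pre_print_horizontal size length) := by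
  unfold Pre_print_horizontal; infer_instance

def pvWitness_print_horizontal : Int × Int := (5, 3)

def Spec_print_horizontal (size : Int) (length : Int) (out : String) : Prop := out = print_horizontal_alt size length
instance (size : Int) (length : Int) (out : String) : Decidable (Spec_print_horizontal size length out) := by unfold Spec_print_horizontal; infer_instance

-- ===== CLAIM (what is proved, stated in full; the proofs are below) =====
def Claim_equal_print_horizontal : Prop := ∀ (size : Int) (length : Int), Dom_print_horizontal size length → Pre_print_horizontal size length → Spec_print_horizontal size length (print_horizontal size length)

-- ===== LEMMAS AND PROOFS =====

-- char-level descending block: [chr(97+s), '-', chr(97+s-1), '-', …]  (n letters)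
def pvDch : Nat → Int → List Char
  | 0, _ => []
  | n+1, s => pyChr (97 + s) :: '-' :: pvDch n (s - 1)

-- string-level block, exactly as A's letter loop builds it
def pvDstr : Nat → Int → List (List Char)
  | 0, _ => []
  | n+1, s => [pyChr (97 + s)] :: ['-'] :: pvDstr n (s - 1)

theorem pv_join_nil_flatten (l : List (List Char)) :
    PySem.Chars.join [] l = l.flatten := by
  induction l with
  | nil => simp [PySem.Chars.join_nil]
  | cons a rest ih =>
    cases rest with
    | nil => simp [PySem.Chars.join_singleton]
    | cons b r => rw [PySem.Chars.join_cons_cons]; simp [ih]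

theorem pv_dash_fold (r : List Int) (acc : List (List Char)) :
    r.foldl (fun acc _ => acc ++ [['-', '-']]) acc
      = acc ++ List.replicate r.length ['-', '-'] := by
  induction r generalizing acc with
  | nil => simp
  | cons x xs ih => simp [List.foldl, ih, List.replicate_succ]

theorem pv_letter_fold (r : List Int) (acc : List (List Char)) (s : Int) :
    r.foldl (fun (p : List (List Char) × Int) _ =>
        (p.1 ++ [[pyChr (97 + p.2)], ['-']], p.2 - 1)) (acc, s)
      = (acc ++ pvDstr r.length s, s - r.length) := by
  induction r generalizing acc s with
  | nil => simp [pvDstr]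
  | cons x xs ih =>
    simp only [List.foldl, List.length_cons, ih, pvDstr, Prod.mk.injEq]
    refine ⟨by simp, by push_cast; ring⟩

theorem pv_flatten_dstr (n : Nat) (s : Int) : (pvDstr n s).flatten = pvDch n s := by
  induction n generalizing s with
  | zero => simp [pvDstr, pvDch]
  | succ k ih => simp [pvDstr, pvDch, ih]

theorem pv_flatten_rep (k : Nat) :
    (List.replicate k (['-', '-'] : List Char)).flatten = List.replicate (2 * k) '-' := by
  induction k with
  | zero => simp
  | succ j ih =>
    rw [List.replicate_succ, List.flatten_cons, ih,
        show 2 * (j+1) = 2 + 2 * j by ring, List.replicate_add]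
    rfl

theorem pv_palin_dstr (n : Nat) (s : Int) :
    ∀ x ∈ pvDstr n s, x.reverse = x := by
  induction n generalizing s with
  | zero => simp [pvDstr]
  | succ j ih =>
    intro x hx
    simp only [pvDstr, List.mem_cons] at hx
    rcases hx with rfl | rfl | hx
    · rfl
    · rfl
    · exact ih (s-1) x hx

theorem pv_flatten_reverse_palin (l : List (List Char)) (h : ∀ x ∈ l, x.reverse = x) :
    l.reverse.flatten = l.flatten.reverse := by
  rw [List.reverse_flatten]
  congr 1
  rw [List.map_congr_left h]; simp

theorem pv_join_cons (sep p : List Char) (l : List (List Char)) (h : l ≠ []) :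
    PySem.Chars.join sep (p :: l) = p ++ sep ++ PySem.Chars.join sep l := by
  cases l with
  | nil => exact absurd rfl h
  | cons q r => rw [PySem.Chars.join_cons_cons]

theorem pv_join_snoc (sep q : List Char) (l : List (List Char)) (h : l ≠ []) :
    PySem.Chars.join sep (l ++ [q]) = PySem.Chars.join sep l ++ sep ++ q := by
  induction l with
  | nil => exact absurd rfl h
  | cons p r ih =>
    cases r with
    | nil => simp [PySem.Chars.join_cons_cons, PySem.Chars.join_singleton]
    | cons p2 r2 =>
      rw [List.cons_append, PySem.Chars.join_cons_cons]
      rw [List.cons_append, PySem.Chars.join_cons_cons] at *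
      simp only [ih (by simp)]
      simp [List.append_assoc]

set_option maxHeartbeats 1000000 in
theorem pv_body_range (M : Nat) (s : Int) :
    PySem.Chars.join ['-']
      ((List.range (2*M+1)).map
        (fun (k : Nat) => [pyChr (97 + s - (M:Int) + ((((M:Int) - (k:Int)).natAbs : Nat) : Int))]))
      = pvDch M s ++ [pyChr (97 + s - (M:Int))] ++ (pvDch M s).reverse := by
  induction M generalizing s with
  | zero => simp [PySem.Chars.join_singleton, pvDch]
  | succ M ih =>
    have hsplit : List.range (2*(M+1)+1) = 0 :: ((List.range (2*M+1)).map Nat.succ) ++ [2*M+2] := by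
      rw [show 2*(M+1)+1 = ((2*M+1)+1)+1 by ring, List.range_succ, List.range_succ_eq_map]
    set f : Nat → List Char :=
      fun (k : Nat) => [pyChr (97 + s - ((M+1:Nat):Int) + ((((((M+1:Nat)):Int) - (k:Int)).natAbs : Nat) : Int))] with hf
    have hmid : (List.range (2*M+1)).map (fun k => f (Nat.succ k))
        = (List.range (2*M+1)).map
            (fun (k : Nat) => [pyChr (97 + (s-1) - (M:Int) + ((((M:Int) - (k:Int)).natAbs : Nat) : Int))]) := by
      apply List.map_congr_left
      intro k _
      have h1 : (((M+1:Nat):Int) - ((Nat.succ k : Nat):Int)) = ((M:Int) - (k:Int)) := by push_cast; ring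
      simp only [hf, h1]
      congr 3
      push_cast; ring
    have hne : ((List.range (2*M+1)).map (fun k => f (Nat.succ k))) ≠ [] := by
      simp [List.range_succ_eq_map]
    rw [hsplit]
    simp only [List.map_cons, List.map_append, List.map_map, Function.comp_def, List.map_nil]
    rw [pv_join_snoc ['-'] (f (2*M+2)) (f 0 :: (List.range (2*M+1)).map (fun x => f x.succ)) (by exact List.cons_ne_nil _ _)]
    rw [pv_join_cons ['-'] (f 0) ((List.range (2*M+1)).map (fun x => f x.succ)) hne]
    rw [hmid, ih (s-1)]
    have hf0 : f 0 = [pyChr (97 + s)] := by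
      simp only [hf]
      congr 2
      push_cast
      rw [show ((M:Int) + 1 - 0) = ((M:Int)+1) by ring, abs_of_nonneg (by positivity : (0:Int) ≤ (M:Int)+1)]
      ring
    have hfb : f (2*M+2) = [pyChr (97 + s)] := by
      simp only [hf]
      congr 2
      push_cast
      rw [show ((M:Int) + 1 - (2*(M:Int)+2)) = -((M:Int)+1) by ring, abs_neg,
         abs_of_nonneg (by positivity : (0:Int) ≤ (M:Int)+1)]
      ring
    rw [hf0, hfb]
    simp only [pvDch, List.reverse_cons, List.append_assoc]
    have hmid2 : (97 + s - ((M+1:Nat):Int)) = (97 + (s-1) - (M:Int)) := by push_cast; ring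
    rw [hmid2]
    simp


set_option maxHeartbeats 1000000 in
theorem pv_main_eq (size length : Int) : print_horizontal size length = print_horizontal_alt size length := by
  unfold print_horizontal print_horizontal_alt
  dsimp only
  set M : Nat := length.toNat with hM
  set K : Nat := (size - length - 1).toNat with hK
  have hmax : max length 0 = (M : Int) := by rw [hM]; omega
  have hKeq : (2 * max 0 (size - length - 1)).toNat = 2 * K := by omega
  -- A side
  rw [pv_dash_fold, pv_letter_fold]
  simp only [List.nil_append, PySem.List.length_pyRange_one]
  have h1 : (length - 0).toNat = M := by omega
  have h2 : ((2 * (M:Int) + 1) - 0).toNat = 2 * M + 1 := by omega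
  rw [h1, hmax, hKeq, ← hK]
  -- A side: join '' is flatten; pull the reversed half through
  have hpal : ∀ x ∈ List.replicate K (['-','-'] : List Char) ++ pvDstr M (size - 1), x.reverse = x := by
    intro x hx
    rcases List.mem_append.1 hx with h | h
    · simp [List.eq_of_mem_replicate h]
    · exact pv_palin_dstr M (size - 1) x h
  rw [pv_join_nil_flatten]
  simp only [List.flatten_append]
  rw [pv_flatten_reverse_palin _ hpal]
  simp only [List.flatten_append, pv_flatten_rep, pv_flatten_dstr, List.flatten_cons,
    List.flatten_nil, List.append_nil, List.reverse_append, List.reverse_replicate]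
  -- B side: reindex the range and apply the body lemma
  rw [PySem.List.pyRange_one, h2, List.map_map]
  have hbody : (List.range (2*M+1)).map
      ((fun j => [pyChr (96 + size - (M:Int) + (((M:Int) - j).natAbs : Int))]) ∘ (fun k : Nat => (0:Int) + (k:Int)))
      = (List.range (2*M+1)).map
        (fun (k : Nat) => [pyChr (97 + (size - 1) - (M:Int) + ((((M:Int) - (k:Int)).natAbs : Nat) : Int))]) := by
    apply List.map_congr_left
    intro k _
    simp only [Function.comp]
    rw [show (0:Int) + (k:Int) = (k:Int) by ring,
        show 96 + size - (M:Int) = 97 + (size - 1) - (M:Int) by ring]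
  rw [hbody, pv_body_range M (size - 1)]
  have hmidc : (97 + (size - 1 - (M:Int))) = (97 + (size - 1) - (M:Int)) := by ring
  rw [hmidc]
  simp [List.append_assoc]

-- ===== VERDICT (by name: the statement is the Claim_ definition above) =====
theorem print_horizontal_spec : Claim_equal_print_horizontal := by
  intro size length _ _
  unfold Spec_print_horizontal
  exact pv_main_eq size length
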